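-- pv_equiv track=rewrite | github.com/Saikatriki2004/Leetcode_2025 | March_2025/Mar_22.py | countCompleteComponents
-- ===== SOURCE A (Python) =====
-- from typing import List
--
-- def countCompleteComponents(n: int, edges: List[List[int]]) -> int:
--     # Step 1: Build the adjacency list
--     adj = [[] for _ in range(n)]
--     for u, v in edges:
--         adj[u].append(v)
--         adj[v].append(u)  # Undirected graph
--
--     # Step 2: Initialize visited array and counter
--     visited = [False] * n
--     count = 0
--
--     # Step 3: Find all connected components using DFS
--     for i in range(n):
--         if not visited[i]:
--             component = []
--             stack = [i]  # Iterative DFS using a stack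
--             while stack:
--                 u = stack.pop()
--                 if not visited[u]:
--                     visited[u] = True
--                     component.append(u)
--                     for v in adj[u]:
--                         if not visited[v]:
--                             stack.append(v)
--
--             # Step 4: Check if the component is complete
--             component_set = set(component)  # For O(1) lookup
--             k = len(component)
--             # A component is complete if every vertex has k-1 neighbors in the component
--             if all(len([v for v in adj[u] if v in component_set]) == k - 1 for u in component):
--                 count += 1
--
--     # Step 5: Return the total count
--     return count
-- ===== SOURCE B (Python) =====
-- from typing import List
--
-- def countCompleteComponents(n: int, edges: List[List[int]]) -> int:
--     # BFS (mark-on-enqueue, growing-list queue) + precomputed degrees,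
--     # instead of A's stack DFS with a per-component membership filter.
--     adj = [[] for _ in range(n)]
--     for u, v in edges:
--         adj[u].append(v)
--         adj[v].append(u)
--     deg = [len(a) for a in adj]
--
--     visited = [False] * n
--     count = 0
--     for i in range(n):
--         if visited[i]:
--             continue
--         visited[i] = True
--         comp = [i]          # the list doubles as the BFS queue
--         head = 0
--         while head < len(comp):
--             u = comp[head]
--             head += 1
--             for v in adj[u]:
--                 if not visited[v]:
--                     visited[v] = True
--                     comp.append(v)
--         k = len(comp)
--         if all(deg[u] == k - 1 for u in comp):
--             count += 1
--     return count
-- ===== Notes on version B (the rewrite author's own statement) =====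
-- stated objective: alternative
-- what changed: Stack DFS (mark-on-pop) with a per-component set and an inner neighbours-in-component filter is replaced by queue BFS (mark-on-enqueue, the component list doubling as the queue) with degrees precomputed once, so the per-vertex completeness test is a single degree comparison instead of a membership scan over the adjacency list.
-- outside the precondition, e.g. on countCompleteComponents(3, [[0, 1], [1, 2], [2, -3]]): A returns 0, B returns 1
import Mathlib
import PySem

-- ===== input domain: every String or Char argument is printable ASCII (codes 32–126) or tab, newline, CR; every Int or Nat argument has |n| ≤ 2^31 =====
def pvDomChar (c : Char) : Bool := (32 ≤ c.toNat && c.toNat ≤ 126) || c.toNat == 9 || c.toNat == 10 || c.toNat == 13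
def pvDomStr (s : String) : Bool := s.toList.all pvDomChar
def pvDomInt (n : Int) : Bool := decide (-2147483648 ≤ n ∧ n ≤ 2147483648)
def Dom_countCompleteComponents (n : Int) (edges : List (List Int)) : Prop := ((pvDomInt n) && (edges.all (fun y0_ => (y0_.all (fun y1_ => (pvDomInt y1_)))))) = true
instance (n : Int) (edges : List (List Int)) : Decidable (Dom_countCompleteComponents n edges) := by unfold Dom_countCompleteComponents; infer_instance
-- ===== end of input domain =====

-- B replaces A's stack DFS (mark-on-pop, per-component set + neighbour filter) by queue BFS
-- (mark-on-enqueue, component list doubling as the queue) with degrees precomputed once.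


-- ===== PORT A =====
-- shared by both ports: both Pythons build the adjacency list with the same loop
-- (edges not of the form [u, v] make Python raise ValueError; Pre_ excludes them)
def pvBuildAdj (n : Int) (edges : List (List Int)) : List (List Int) :=
  edges.foldl (fun adj e =>
    match e with
    | [u, v] => (adj.modify u.toNat (· ++ [v])).modify v.toNat (· ++ [u])
    | _ => adj
  ) (List.replicate n.toNat [])

-- termination helper for the DFS/BFS loops: marking an unvisited cell decreases the false-count
theorem pvCountFalseSet (vis : List Bool) (j : Nat) (h : vis.getD j true = false) :
    (vis.set j true).count false + 1 = vis.count false := by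
  have hj : j < vis.length := by
    by_contra hge
    simp [List.getD_eq_getElem?_getD, List.getElem?_eq_none (by omega : vis.length ≤ j)] at h
  have hv : vis[j] = false := by
    simpa [List.getD_eq_getElem?_getD, List.getElem?_eq_getElem hj] using h
  have hset : vis.set j true = vis.take j ++ true :: vis.drop (j + 1) := by
    rw [List.set_eq_take_append_cons_drop, if_pos hj]
  have hsplit : vis = vis.take j ++ vis[j] :: vis.drop (j + 1) := by
    conv_lhs => rw [← List.take_append_drop j vis, List.drop_eq_getElem_cons hj]
  rw [hset]
  conv_rhs => rw [hsplit]
  simp [List.count_append, hv]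
  omega

-- iterative DFS of A; the stack is kept top-first (Python appends/pops at the right end)
def pvDfsA (adj : List (List Int)) (vis : List Bool) (stack comp : List Int) :
    List Bool × List Int :=
  match stack with
  | [] => (vis, comp)
  | u :: rest =>
    if h : vis.getD u.toNat true then pvDfsA adj vis rest comp
    else
      pvDfsA adj (vis.set u.toNat true)
        (((adj.getD u.toNat []).filter
            (fun v => !((vis.set u.toNat true).getD v.toNat true))).reverse ++ rest)
        (comp ++ [u])
termination_by (vis.count false, stack.length)
decreasing_by
  · exact Prod.Lex.right _ (by simp)
  · exact Prod.Lex.left _ _ (by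
      have := pvCountFalseSet vis u.toNat (by simpa using h)
      omega)

def countCompleteComponents (n : Int) (edges : List (List Int)) : Int :=
  let adj := pvBuildAdj n edges
  ((List.range n.toNat).foldl (fun (st : List Bool × Int) i =>
    if st.1.getD i true then st
    else
      let r := pvDfsA adj st.1 [(i : Int)] []
      let cset := PySem.Set.ofList r.2
      let k : Int := r.2.length
      if r.2.all (fun u =>
          (((adj.getD u.toNat []).filter (fun v => PySem.Set.contains cset v)).length : Int)
            == k - 1)
      then (r.1, st.2 + 1) else (r.1, st.2)
  ) (List.replicate n.toNat false, 0)).2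

-- ===== PORT B =====
-- one step of B's inner neighbour loop: mark-on-enqueue (the component list is the queue)
def pvBfsStep (st : List Bool × List Int) (v : Int) : List Bool × List Int :=
  if st.1.getD v.toNat true then st else (st.1.set v.toNat true, st.2 ++ [v])

theorem pvBfsStepMeas (l : List Int) (st : List Bool × List Int) :
    (l.foldl pvBfsStep st).1.count false + (l.foldl pvBfsStep st).2.length
      = st.1.count false + st.2.length
    ∧ st.2.length ≤ (l.foldl pvBfsStep st).2.length := by
  induction l generalizing st with
  | nil => simp
  | cons v l ih =>
    simp only [List.foldl_cons]
    rcases ih (pvBfsStep st v) with ⟨h1, h2⟩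
    by_cases hv : st.1.getD v.toNat true
    · have hs : pvBfsStep st v = st := by rw [pvBfsStep, if_pos hv]
      rw [hs] at h1 h2 ⊢
      exact ⟨h1, h2⟩
    · have hs : pvBfsStep st v = (st.1.set v.toNat true, st.2 ++ [v]) := by
        rw [pvBfsStep, if_neg hv]
      have hc := pvCountFalseSet st.1 v.toNat (by simpa using hv)
      rw [hs] at h1 h2 ⊢
      simp only [List.length_append, List.length_cons, List.length_nil] at h1 h2
      constructor
      · rw [h1]; omega
      · omega

-- B's BFS over one component: comp doubles as the queue, head is the read pointer
def pvBfsB (adj : List (List Int)) (vis : List Bool) (comp : List Int) (head : Nat) :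
    List Bool × List Int :=
  if h : head < comp.length then
    pvBfsB adj ((adj.getD (comp[head]'h).toNat []).foldl pvBfsStep (vis, comp)).1
      ((adj.getD (comp[head]'h).toNat []).foldl pvBfsStep (vis, comp)).2 (head + 1)
  else (vis, comp)
termination_by vis.count false + (comp.length - head)
decreasing_by
  obtain ⟨h1, h2⟩ := pvBfsStepMeas (adj.getD (comp[head]'h).toNat []) (vis, comp)
  simp only [List.length_cons] at h1 h2 ⊢
  omega

def countCompleteComponents_alt (n : Int) (edges : List (List Int)) : Int :=
  let adj := pvBuildAdj n edges
  let deg := adj.map (fun a => (a.length : Int))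
  ((List.range n.toNat).foldl (fun (st : List Bool × Int) i =>
    if st.1.getD i true then st
    else
      let r := pvBfsB adj (st.1.set i true) [(i : Int)] 0
      let k : Int := r.2.length
      if r.2.all (fun u => deg.getD u.toNat 0 == k - 1)
      then (r.1, st.2 + 1) else (r.1, st.2)
  ) (List.replicate n.toNat false, 0)).2

-- ===== PRECONDITION & SPEC =====
-- Pre_ admits exactly the edge lists whose entries are pairs of in-range vertex indices
-- 0 ≤ x < n: on any other arity A raises ValueError, on x ≥ n or x < -n it raises
-- IndexError, and for -n ≤ x < 0 both programs hit Python's negative-index wraparound,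
-- a corner outside any graph specification where both values are implementation accidents.
def Pre_countCompleteComponents (n : Int) (edges : List (List Int)) : Prop :=
  ∀ e ∈ edges, e.length = 2 ∧ ∀ x ∈ e, 0 ≤ x ∧ x < n

instance (n : Int) (edges : List (List Int)) : Decidable (Pre_countCompleteComponents n edges) := by
  unfold Pre_countCompleteComponents; infer_instance

def pvWitness_countCompleteComponents : Int × List (List Int) := (3, [[0, 1], [1, 2], [0, 2]])

def Spec_countCompleteComponents (n : Int) (edges : List (List Int)) (out : Int) : Prop :=
  out = countCompleteComponents_alt n edges
instance (n : Int) (edges : List (List Int)) (out : Int) :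
    Decidable (Spec_countCompleteComponents n edges out) := by
  unfold Spec_countCompleteComponents; infer_instance

-- ===== CLAIM (what is proved, stated in full; the proofs are below) =====
def Claim_equal_countCompleteComponents : Prop :=
  ∀ (n : Int) (edges : List (List Int)), Dom_countCompleteComponents n edges →
    Pre_countCompleteComponents n edges →
    Spec_countCompleteComponents n edges (countCompleteComponents n edges)

-- ===== LEMMAS AND PROOFS =====

-- "vertex x (a list index) is marked in the visited array"
def pvVisN (vis : List Bool) (x : Nat) : Prop := vis.getD x true = true

-- the adjacency relation on indices
def pvAdjN (adj : List (List Int)) (a b : Nat) : Prop := (b : Int) ∈ adj.getD a []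

-- a path all of whose vertices (including the endpoints) avoid the marked set V
inductive pvPath (adj : List (List Int)) (V : Nat → Prop) : Nat → Nat → Prop where
  | refl (u : Nat) (h : ¬ V u) : pvPath adj V u u
  | head (u v w : Nat) (h1 : ¬ V u) (h2 : pvAdjN adj u v) (hp : pvPath adj V v w) :
      pvPath adj V u w

theorem pvPath_not_start {adj : List (List Int)} {V : Nat → Prop} {s w : Nat}
    (h : pvPath adj V s w) : ¬ V s := by cases h <;> assumption

theorem pvPath_anti {adj : List (List Int)} {V V' : Nat → Prop} {s w : Nat}
    (hsub : ∀ x, V' x → V x) (h : pvPath adj V s w) : pvPath adj V' s w := by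
  induction h with
  | refl u h => exact .refl u (fun hx => h (hsub u hx))
  | head u v w h1 h2 _ ih => exact .head u v w (fun hx => h1 (hsub u hx)) h2 ih

theorem pvPath_congr {adj : List (List Int)} {V V' : Nat → Prop} {s w : Nat}
    (hiff : ∀ x, V x ↔ V' x) (h : pvPath adj V s w) : pvPath adj V' s w :=
  pvPath_anti (fun x hx => (hiff x).2 hx) h

theorem pvPath_snoc {adj : List (List Int)} {V : Nat → Prop} {s u v : Nat}
    (h : pvPath adj V s u) (h2 : pvAdjN adj u v) (hv : ¬ V v) : pvPath adj V s v := by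
  induction h with
  | refl u h => exact .head u v v h h2 (.refl v hv)
  | head a b c h1 hadj _ ih => exact .head a b v h1 hadj (ih h2)

-- surgery lemma: marking a set M re-roots paths at their last M-vertex
theorem pvPath_mark {adj : List (List Int)} {V M : Nat → Prop} {s w : Nat}
    (h : pvPath adj V s w) :
    pvPath adj (fun x => V x ∨ M x) s w ∨ M w ∨
      ∃ m v', M m ∧ pvAdjN adj m v' ∧ pvPath adj (fun x => V x ∨ M x) v' w := by
  induction h with
  | refl u h =>
    by_cases hm : M u
    · exact Or.inr (Or.inl hm)
    · exact Or.inl (.refl u (by tauto))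
  | head u v w h1 h2 hp ih =>
    rcases ih with p2 | hw | ⟨m, v', hm, hadj, hp2⟩
    · by_cases hm : M u
      · exact Or.inr (Or.inr ⟨u, v, hm, h2, p2⟩)
      · exact Or.inl (.head u v w (by tauto) h2 p2)
    · exact Or.inr (Or.inl hw)
    · exact Or.inr (Or.inr ⟨m, v', hm, hadj, hp2⟩)

-- ===== facts about marking / visited arrays =====

theorem pvVisN_getD_lt {vis : List Bool} {j : Nat} (h : vis.getD j true = false) :
    j < vis.length := by
  by_contra hge
  simp [List.getD_eq_getElem?_getD, List.getElem?_eq_none (by omega : vis.length ≤ j)] at h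

theorem pvVisN_set {vis : List Bool} {j : Nat} (hj : j < vis.length) (x : Nat) :
    pvVisN (vis.set j true) x ↔ pvVisN vis x ∨ x = j := by
  unfold pvVisN
  rw [List.getD_eq_getElem?_getD, List.getD_eq_getElem?_getD, List.getElem?_set]
  by_cases hx : j = x
  · subst hx
    simp [hj]
  · simp [hx, show ¬(x = j) from fun h => hx h.symm]

theorem pvVisN_set_mono {vis : List Bool} {j : Nat} {x : Nat}
    (h : pvVisN vis x) : pvVisN (vis.set j true) x := by
  unfold pvVisN at *
  rw [List.getD_eq_getElem?_getD, List.getElem?_set]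
  rw [List.getD_eq_getElem?_getD] at h
  by_cases hx : j = x
  · subst hx
    by_cases hj : j < vis.length <;> simp [hj]
  · simpa [hx] using h

theorem pvMemModifyAppend (acc : List (List Int)) (i : Nat) (x : Int) (hi : i < acc.length)
    (v : Int) (j : Nat) :
    (v ∈ (acc.modify i (· ++ [x])).getD j [] ↔ v ∈ acc.getD j [] ∨ (j = i ∧ v = x)) := by
  rw [List.getD_eq_getElem?_getD, List.getD_eq_getElem?_getD, List.getElem?_modify]
  by_cases hj : j < acc.length
  · rw [List.getElem?_eq_getElem hj]
    by_cases hij : i = j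
    · simp [hij]
    · simp [hij, show ¬(j = i) from fun h => hij h.symm]
  · rw [List.getElem?_eq_none (by omega)]
    simp
    omega

theorem pvLenModifyAppend (acc : List (List Int)) (i : Nat) (x : Int) :
    (acc.modify i (· ++ [x])).length = acc.length := by simp

theorem pvBuildAdj_aux (n : Int) :
    ∀ (edges : List (List Int)) (acc : List (List Int)),
    (∀ e ∈ edges, e.length = 2 ∧ ∀ x ∈ e, 0 ≤ x ∧ x < n) →
    acc.length = n.toNat →
    (∀ j : Nat, ∀ v ∈ acc.getD j [], 0 ≤ v ∧ v < n) →
    (∀ u v : Int, 0 ≤ u → u < n → 0 ≤ v → v < n → v ∈ acc.getD u.toNat [] →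
        u ∈ acc.getD v.toNat []) →
    (edges.foldl (fun adj e =>
      match e with
      | [u, v] => (adj.modify u.toNat (· ++ [v])).modify v.toNat (· ++ [u])
      | _ => adj) acc).length = n.toNat
    ∧ (∀ j : Nat, ∀ v ∈ (edges.foldl (fun adj e =>
      match e with
      | [u, v] => (adj.modify u.toNat (· ++ [v])).modify v.toNat (· ++ [u])
      | _ => adj) acc).getD j [], 0 ≤ v ∧ v < n)
    ∧ (∀ u v : Int, 0 ≤ u → u < n → 0 ≤ v → v < n →
        v ∈ (edges.foldl (fun adj e =>
      match e with
      | [u, v] => (adj.modify u.toNat (· ++ [v])).modify v.toNat (· ++ [u])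
      | _ => adj) acc).getD u.toNat [] →
        u ∈ (edges.foldl (fun adj e =>
      match e with
      | [u, v] => (adj.modify u.toNat (· ++ [v])).modify v.toNat (· ++ [u])
      | _ => adj) acc).getD v.toNat []) := by
  intro edges
  induction edges with
  | nil => intro acc _ h1 h2 h3; exact ⟨h1, h2, h3⟩
  | cons e es ih =>
    intro acc hpre hlen hrng hsym
    obtain ⟨hel, hex⟩ := hpre e (List.mem_cons_self ..)
    match e, hel with
    | [a, b], _ =>
      have ha := hex a (by simp)
      have hb := hex b (by simp)
      have hia : a.toNat < acc.length := by omega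
      have hib : b.toNat < (acc.modify a.toNat (· ++ [b])).length := by
        rw [pvLenModifyAppend]; omega
      have hmem : ∀ (v : Int) (j : Nat),
          v ∈ ((acc.modify a.toNat (· ++ [b])).modify b.toNat (· ++ [a])).getD j [] ↔
            (v ∈ acc.getD j [] ∨ (j = a.toNat ∧ v = b)) ∨ (j = b.toNat ∧ v = a) := by
        intro v j
        rw [pvMemModifyAppend _ _ _ hib, pvMemModifyAppend _ _ _ hia]
      simp only [List.foldl_cons]
      apply ih
      · intro e' he'; exact hpre e' (List.mem_cons_of_mem _ he')
      · rw [List.length_modify, List.length_modify]; exact hlen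
      · intro j v hv
        rcases (hmem v j).1 hv with (h | ⟨_, rfl⟩) | ⟨_, rfl⟩
        · exact hrng j v h
        · exact hb
        · exact ha
      · intro u v hu0 hun hv0 hvn hv
        rcases (hmem v u.toNat).1 hv with (h | ⟨hj, hvb⟩) | ⟨hj, hva⟩
        · exact (hmem u v.toNat).2 (Or.inl (Or.inl (hsym u v hu0 hun hv0 hvn h)))
        · have hua : u = a := by omega
          exact (hmem u v.toNat).2 (Or.inr ⟨by rw [hvb], hua⟩)
        · have hub : u = b := by omega
          exact (hmem u v.toNat).2 (Or.inl (Or.inr ⟨by rw [hva], hub⟩))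

theorem pvBuildAdj_spec' (n : Int) (edges : List (List Int))
    (hpre : Pre_countCompleteComponents n edges) :
    (pvBuildAdj n edges).length = n.toNat
    ∧ (∀ j : Nat, ∀ v ∈ (pvBuildAdj n edges).getD j [], 0 ≤ v ∧ v < n)
    ∧ (∀ u v : Int, 0 ≤ u → u < n → 0 ≤ v → v < n →
        v ∈ (pvBuildAdj n edges).getD u.toNat [] →
        u ∈ (pvBuildAdj n edges).getD v.toNat []) := by
  have hrep : ∀ j : Nat, (List.replicate n.toNat ([] : List Int)).getD j [] = [] := by
    intro j
    rw [List.getD_eq_getElem?_getD, List.getElem?_replicate]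
    split <;> rfl
  have := pvBuildAdj_aux n edges (List.replicate n.toNat []) hpre (by simp)
    (by intro j v hv; rw [hrep] at hv; simp at hv)
    (by intro u v _ _ _ _ hv; rw [hrep] at hv; simp at hv)
  exact this

theorem pvNotVis {vis : List Bool} {x : Nat} (h : vis.getD x true = false) : ¬ pvVisN vis x := by
  unfold pvVisN
  rw [h]
  simp

theorem pvDfsA_spec' (n : Int) (adj : List (List Int))
    (hrange : ∀ j : Nat, ∀ v ∈ adj.getD j [], 0 ≤ v ∧ v < n) :
    ∀ (vis : List Bool) (stack comp : List Int),
    vis.length = n.toNat →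
    (∀ s ∈ stack, 0 ≤ s ∧ s < n) →
    (∀ c ∈ comp, 0 ≤ c ∧ c < n ∧ pvVisN vis c.toNat) →
    comp.Nodup →
    (pvDfsA adj vis stack comp).1.length = n.toNat
    ∧ (∀ x : Nat, pvVisN vis x → pvVisN (pvDfsA adj vis stack comp).1 x)
    ∧ (∀ x : Nat, x < n.toNat → pvVisN (pvDfsA adj vis stack comp).1 x →
        pvVisN vis x ∨ ∃ s ∈ stack, pvPath adj (pvVisN vis) s.toNat x)
    ∧ (∀ s ∈ stack, ∀ x : Nat, pvPath adj (pvVisN vis) s.toNat x →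
        pvVisN (pvDfsA adj vis stack comp).1 x)
    ∧ ∃ Δ, (pvDfsA adj vis stack comp).2 = comp ++ Δ
        ∧ (comp ++ Δ).Nodup
        ∧ (∀ c ∈ Δ, 0 ≤ c ∧ c < n)
        ∧ (∀ w : Int, 0 ≤ w → w < n →
            (w ∈ Δ ↔ ¬ pvVisN vis w.toNat ∧ pvVisN (pvDfsA adj vis stack comp).1 w.toNat)) := by
  intro vis stack comp
  induction vis, stack, comp using pvDfsA.induct adj with
  | case1 vis comp =>
    intro hvl _ _ hnd
    have hr : pvDfsA adj vis [] comp = (vis, comp) := by rw [pvDfsA]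
    rw [hr]
    refine ⟨hvl, fun x hx => hx, fun x _ hx => Or.inl hx, by simp, [], by simp, by simpa, by simp, ?_⟩
    intro w _ _
    simp only [List.not_mem_nil, false_iff]
    tauto
  | case2 vis comp u rest h ih =>
    intro hvl hst hcm hnd
    have hr : pvDfsA adj vis (u :: rest) comp = pvDfsA adj vis rest comp := by
      rw [pvDfsA]; rw [dif_pos h]
    rw [hr]
    obtain ⟨c1, c2, c3, c4, c5⟩ := ih hvl (fun s hs => hst s (List.mem_cons_of_mem _ hs)) hcm hnd
    refine ⟨c1, c2, ?_, ?_, c5⟩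
    · intro x hx hvx
      rcases c3 x hx hvx with h' | ⟨s, hs, hp⟩
      · exact Or.inl h'
      · exact Or.inr ⟨s, List.mem_cons_of_mem _ hs, hp⟩
    · intro s hs x hp
      rcases List.mem_cons.1 hs with rfl | hs'
      · exact absurd h (pvPath_not_start hp)
      · exact c4 s hs' x hp
  | case3 vis comp u rest h ih =>
    intro hvl hst hcm hnd
    have hvf : vis.getD u.toNat true = false := by
      cases hb : vis.getD u.toNat true
      · rfl
      · exact absurd hb h
    have hjlt : u.toNat < vis.length := pvVisN_getD_lt hvf
    obtain ⟨hu0, hun⟩ := hst u (List.mem_cons_self ..)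
    have hset : ∀ x, pvVisN (vis.set u.toNat true) x ↔ pvVisN vis x ∨ x = u.toNat :=
      pvVisN_set hjlt
    have hnva : ¬ pvVisN vis u.toNat := pvNotVis hvf
    have hr : pvDfsA adj vis (u :: rest) comp
        = pvDfsA adj (vis.set u.toNat true)
            (((adj.getD u.toNat []).filter
              (fun v => !(vis.set u.toNat true).getD v.toNat true)).reverse ++ rest)
            (comp ++ [u]) := by
      rw [pvDfsA]; rw [dif_neg (by rw [hvf]; simp)]
    rw [hr]
    -- instantiate the induction hypothesis
    have hmemf : ∀ s : Int,
        s ∈ ((adj.getD u.toNat []).filter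
              (fun v => !(vis.set u.toNat true).getD v.toNat true)).reverse ++ rest ↔
        (s ∈ adj.getD u.toNat [] ∧ ¬ pvVisN (vis.set u.toNat true) s.toNat) ∨ s ∈ rest := by
      intro s
      simp [List.mem_filter, pvVisN]
    obtain ⟨c1, c2, c3, c4, c5⟩ := ih
      (by simpa using hvl)
      (by intro s hs
          rcases (hmemf s).1 hs with ⟨hs1, _⟩ | hs2
          · exact hrange u.toNat s hs1
          · exact hst s (List.mem_cons_of_mem _ hs2))
      (by intro c hc
          rcases List.mem_append.1 hc with hc' | hc'
          · obtain ⟨a1, a2, a3⟩ := hcm c hc'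
            exact ⟨a1, a2, pvVisN_set_mono a3⟩
          · have hcu : c = u := List.mem_singleton.1 hc'
            rw [hcu]
            exact ⟨hu0, hun, (hset u.toNat).2 (Or.inr rfl)⟩)
      (by rw [List.nodup_append]
          refine ⟨hnd, by simp, ?_⟩
          intro a ha b hb heq
          have hbu : b = u := by simpa using hb
          rw [heq, hbu] at ha
          exact hnva (hcm u ha).2.2)
    refine ⟨c1, ?_, ?_, ?_, ?_⟩
    · intro x hx
      exact c2 x ((hset x).2 (Or.inl hx))
    · -- soundness
      intro x hx hvx
      rcases c3 x hx hvx with h2 | ⟨s, hs, hp⟩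
      · rcases (hset x).1 h2 with h3 | rfl
        · exact Or.inl h3
        · exact Or.inr ⟨u, List.mem_cons_self .., pvPath.refl _ hnva⟩
      · have hp' : pvPath adj (pvVisN vis) s.toNat x :=
          pvPath_anti (fun y hy => (hset y).2 (Or.inl hy)) hp
        rcases (hmemf s).1 hs with ⟨hs1, _⟩ | hs2
        · obtain ⟨hs0, _⟩ := hrange u.toNat s hs1
          have hadj : pvAdjN adj u.toNat s.toNat := by
            unfold pvAdjN
            rwa [Int.toNat_of_nonneg hs0]
          exact Or.inr ⟨u, List.mem_cons_self .., pvPath.head _ _ _ hnva hadj hp'⟩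
        · exact Or.inr ⟨s, List.mem_cons_of_mem _ hs2, hp'⟩
    · -- completeness
      intro s hs x hp
      have hcongr : ∀ {a b : Nat}, pvPath adj (fun y => pvVisN vis y ∨ y = u.toNat) a b →
          pvPath adj (pvVisN (vis.set u.toNat true)) a b :=
        fun hq => pvPath_congr (fun y => (hset y).symm) hq
      rcases pvPath_mark (M := fun y => y = u.toNat) hp with p2 | hxu | ⟨m, v', hm, hadj, p2⟩
      · have p2' := hcongr p2
        rcases List.mem_cons.1 hs with hsu | hs'
        · refine absurd ?_ (pvPath_not_start p2')
          rw [hsu]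
          exact (hset u.toNat).2 (Or.inr rfl)
        · exact c4 s ((hmemf s).2 (Or.inr hs')) x p2'
      · have hx2 : pvVisN (vis.set u.toNat true) x := by
          rw [hxu]
          exact (hset u.toNat).2 (Or.inr rfl)
        exact c2 x hx2
      · subst hm
        have p2' := hcongr p2
        have hv' : ¬ pvVisN (vis.set u.toNat true) v' := pvPath_not_start p2'
        have hadj' : (v' : Int) ∈ adj.getD u.toNat [] := hadj
        have hsmem : ((v' : Int)) ∈ ((adj.getD u.toNat []).filter
              (fun v => !(vis.set u.toNat true).getD v.toNat true)).reverse ++ rest := by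
          refine (hmemf _).2 (Or.inl ⟨hadj', ?_⟩)
          simpa using hv'
        have := c4 (v' : Int) hsmem x (by simpa using p2')
        exact this
    · -- the component
      obtain ⟨Δ', e5, nd5, rg5, mm5⟩ := c5
      refine ⟨u :: Δ', ?_, ?_, ?_, ?_⟩
      · rw [e5, ← List.append_cons]
      · rw [← List.append_cons] at nd5
        exact nd5
      · intro c hc
        rcases List.mem_cons.1 hc with rfl | hc'
        · exact ⟨hu0, hun⟩
        · exact rg5 c hc'
      · intro w hw0 hwn
        constructor
        · intro hwm
          rcases List.mem_cons.1 hwm with hwu | hw'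
          · rw [hwu]
            exact ⟨hnva, c2 u.toNat ((hset u.toNat).2 (Or.inr rfl))⟩
          · obtain ⟨m1, m2⟩ := (mm5 w hw0 hwn).1 hw'
            exact ⟨fun hx => m1 ((hset w.toNat).2 (Or.inl hx)), m2⟩
        · rintro ⟨m1, m2⟩
          by_cases hwu : w = u
          · subst hwu; exact List.mem_cons_self ..
          · have hne : w.toNat ≠ u.toNat := by omega
            refine List.mem_cons_of_mem _ ((mm5 w hw0 hwn).2 ⟨?_, m2⟩)
            intro hx
            rcases (hset w.toNat).1 hx with h3 | h3
            · exact m1 h3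
            · exact hne h3

theorem pvBfsFold_spec' (n : Int) :
    ∀ (l : List Int), (∀ v ∈ l, 0 ≤ v ∧ v < n) →
    ∀ (vis : List Bool) (comp : List Int),
    vis.length = n.toNat →
    (∀ c ∈ comp, 0 ≤ c ∧ c < n ∧ pvVisN vis c.toNat) →
    comp.Nodup →
    (l.foldl pvBfsStep (vis, comp)).1.length = n.toNat
    ∧ (∀ x : Nat, pvVisN (l.foldl pvBfsStep (vis, comp)).1 x ↔
        pvVisN vis x ∨ ∃ v ∈ l, v.toNat = x)
    ∧ ∃ Δ, (l.foldl pvBfsStep (vis, comp)).2 = comp ++ Δ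
        ∧ (comp ++ Δ).Nodup
        ∧ (∀ c ∈ Δ, (0 ≤ c ∧ c < n) ∧ c ∈ l)
        ∧ (∀ w : Int, 0 ≤ w → w < n →
            (w ∈ Δ ↔ ¬ pvVisN vis w.toNat ∧ pvVisN (l.foldl pvBfsStep (vis, comp)).1 w.toNat)) := by
  intro l
  induction l with
  | nil =>
    intro _ vis comp hvl hcm hnd
    refine ⟨hvl, by simp, [], by simp, by simpa, by simp, ?_⟩
    intro w _ _
    simp only [List.not_mem_nil, false_iff]
    tauto
  | cons v l ih =>
    intro hl vis comp hvl hcm hnd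
    obtain ⟨hv0, hvn⟩ := hl v (List.mem_cons_self ..)
    simp only [List.foldl_cons]
    by_cases hv : vis.getD v.toNat true
    · have hs : pvBfsStep (vis, comp) v = (vis, comp) := by rw [pvBfsStep, if_pos hv]
      rw [hs]
      obtain ⟨c1, c2, Δ, e3, nd3, rg3, mm3⟩ :=
        ih (fun w hw => hl w (List.mem_cons_of_mem _ hw)) vis comp hvl hcm hnd
      refine ⟨c1, ?_, Δ, e3, nd3, ?_, mm3⟩
      · intro x
        rw [c2 x]
        constructor
        · rintro (hx | ⟨w, hw, hwx⟩)
          · exact Or.inl hx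
          · exact Or.inr ⟨w, List.mem_cons_of_mem _ hw, hwx⟩
        · rintro (hx | ⟨w, hw, hwx⟩)
          · exact Or.inl hx
          · rcases List.mem_cons.1 hw with hwv | hw'
            · refine Or.inl ?_
              rw [← hwx, hwv]
              exact hv
            · exact Or.inr ⟨w, hw', hwx⟩
      · intro c hc
        obtain ⟨hr, hcl⟩ := rg3 c hc
        exact ⟨hr, List.mem_cons_of_mem _ hcl⟩
    · have hvf : vis.getD v.toNat true = false := by
        cases hb : vis.getD v.toNat true
        · rfl
        · exact absurd hb hv
      have hjlt : v.toNat < vis.length := pvVisN_getD_lt hvf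
      have hset : ∀ x, pvVisN (vis.set v.toNat true) x ↔ pvVisN vis x ∨ x = v.toNat :=
        pvVisN_set hjlt
      have hnv : ¬ pvVisN vis v.toNat := pvNotVis hvf
      have hs : pvBfsStep (vis, comp) v = (vis.set v.toNat true, comp ++ [v]) := by
        rw [pvBfsStep, if_neg hv]
      rw [hs]
      obtain ⟨c1, c2, Δ, e3, nd3, rg3, mm3⟩ :=
        ih (fun w hw => hl w (List.mem_cons_of_mem _ hw)) (vis.set v.toNat true) (comp ++ [v])
          (by simpa using hvl)
          (by intro c hc
              rcases List.mem_append.1 hc with hc' | hc'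
              · obtain ⟨a1, a2, a3⟩ := hcm c hc'
                exact ⟨a1, a2, pvVisN_set_mono a3⟩
              · have hcv : c = v := List.mem_singleton.1 hc'
                rw [hcv]
                exact ⟨hv0, hvn, (hset v.toNat).2 (Or.inr rfl)⟩)
          (by rw [List.nodup_append]
              refine ⟨hnd, by simp, ?_⟩
              intro a ha b hb heq
              have hbv : b = v := List.mem_singleton.1 hb
              rw [heq, hbv] at ha
              exact hnv (hcm v ha).2.2)
      refine ⟨c1, ?_, v :: Δ, ?_, ?_, ?_, ?_⟩
      · intro x
        rw [c2 x]
        constructor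
        · rintro (hx | ⟨w, hw, hwx⟩)
          · rcases (hset x).1 hx with hx' | hx'
            · exact Or.inl hx'
            · exact Or.inr ⟨v, List.mem_cons_self .., hx'.symm⟩
          · exact Or.inr ⟨w, List.mem_cons_of_mem _ hw, hwx⟩
        · rintro (hx | ⟨w, hw, hwx⟩)
          · exact Or.inl ((hset x).2 (Or.inl hx))
          · rcases List.mem_cons.1 hw with hwv | hw'
            · refine Or.inl ((hset x).2 (Or.inr ?_))
              rw [← hwx, hwv]
            · exact Or.inr ⟨w, hw', hwx⟩
      · rw [e3, ← List.append_cons]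
      · rw [← List.append_cons] at nd3
        exact nd3
      · intro c hc
        rcases List.mem_cons.1 hc with hcv | hc'
        · rw [hcv]
          exact ⟨⟨hv0, hvn⟩, List.mem_cons_self ..⟩
        · obtain ⟨hr, hcl⟩ := rg3 c hc'
          exact ⟨hr, List.mem_cons_of_mem _ hcl⟩
      · intro w hw0 hwn
        constructor
        · intro hwm
          rcases List.mem_cons.1 hwm with hwv | hw'
          · rw [hwv]
            refine ⟨hnv, ?_⟩
            rw [c2 v.toNat]
            exact Or.inl ((hset v.toNat).2 (Or.inr rfl))
          · obtain ⟨m1, m2⟩ := (mm3 w hw0 hwn).1 hw'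
            exact ⟨fun hx => m1 ((hset w.toNat).2 (Or.inl hx)), m2⟩
        · rintro ⟨m1, m2⟩
          by_cases hwv : w = v
          · rw [hwv]; exact List.mem_cons_self ..
          · have hne : w.toNat ≠ v.toNat := by omega
            refine List.mem_cons_of_mem _ ((mm3 w hw0 hwn).2 ⟨?_, m2⟩)
            intro hx
            rcases (hset w.toNat).1 hx with h3 | h3
            · exact m1 h3
            · exact hne h3

theorem pvBfsB_spec' (n : Int) (adj : List (List Int))
    (hrange : ∀ j : Nat, ∀ v ∈ adj.getD j [], 0 ≤ v ∧ v < n) :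
    ∀ (vis : List Bool) (comp : List Int) (head : Nat),
    vis.length = n.toNat →
    (∀ c ∈ comp, 0 ≤ c ∧ c < n ∧ pvVisN vis c.toNat) →
    comp.Nodup →
    (pvBfsB adj vis comp head).1.length = n.toNat
    ∧ (∀ x : Nat, pvVisN vis x → pvVisN (pvBfsB adj vis comp head).1 x)
    ∧ (∀ x : Nat, x < n.toNat → pvVisN (pvBfsB adj vis comp head).1 x →
        pvVisN vis x ∨ ∃ s ∈ comp.drop head, ∃ v : Nat,
          pvAdjN adj s.toNat v ∧ pvPath adj (pvVisN vis) v x)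
    ∧ (∀ s ∈ comp.drop head, ∀ v x : Nat, pvAdjN adj s.toNat v →
        pvPath adj (pvVisN vis) v x → pvVisN (pvBfsB adj vis comp head).1 x)
    ∧ ∃ Δ, (pvBfsB adj vis comp head).2 = comp ++ Δ
        ∧ (comp ++ Δ).Nodup
        ∧ (∀ c ∈ Δ, 0 ≤ c ∧ c < n)
        ∧ (∀ w : Int, 0 ≤ w → w < n →
            (w ∈ Δ ↔ ¬ pvVisN vis w.toNat ∧ pvVisN (pvBfsB adj vis comp head).1 w.toNat)) := by
  intro vis comp head
  induction vis, comp, head using pvBfsB.induct adj with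
  | case2 vis comp head h =>
    intro hvl hcm hnd
    have hr : pvBfsB adj vis comp head = (vis, comp) := by
      rw [pvBfsB]; rw [dif_neg h]
    rw [hr]
    have hdrop : comp.drop head = [] := List.drop_eq_nil_of_le (by omega)
    refine ⟨hvl, fun x hx => hx, fun x _ hx => Or.inl hx, ?_, [], by simp, by simpa, by simp, ?_⟩
    · intro s hs
      rw [hdrop] at hs
      simp at hs
    · intro w _ _
      simp only [List.not_mem_nil, false_iff]
      tauto
  | case1 vis comp head h ih =>
    intro hvl hcm hnd
    have hr : pvBfsB adj vis comp head
        = pvBfsB adj ((adj.getD (comp[head]'h).toNat []).foldl pvBfsStep (vis, comp)).1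
            ((adj.getD (comp[head]'h).toNat []).foldl pvBfsStep (vis, comp)).2 (head + 1) := by
      rw [pvBfsB]; rw [dif_pos h]
    rw [hr]
    obtain ⟨hu0, hun, humk⟩ := hcm (comp[head]'h) (List.getElem_mem h)
    have hdrop : comp.drop head = (comp[head]'h) :: comp.drop (head + 1) :=
      List.drop_eq_getElem_cons h
    obtain ⟨f1, f2, Δ₀, e0, nd0, rg0, mm0⟩ :=
      pvBfsFold_spec' n (adj.getD (comp[head]'h).toNat [])
        (hrange (comp[head]'h).toNat) vis comp hvl hcm hnd
    set st := (adj.getD (comp[head]'h).toNat []).foldl pvBfsStep (vis, comp) with hst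
    have hmono0 : ∀ x : Nat, pvVisN vis x → pvVisN st.1 x := fun x hx => (f2 x).2 (Or.inl hx)
    obtain ⟨c1, c2, c3, c4, Δ1, e1, nd1, rg1, mm1⟩ := ih f1
      (by intro c hc
          rw [e0] at hc
          rcases List.mem_append.1 hc with hc' | hc'
          · obtain ⟨a1, a2, a3⟩ := hcm c hc'
            exact ⟨a1, a2, hmono0 _ a3⟩
          · obtain ⟨⟨a1, a2⟩, _⟩ := rg0 c hc'
            have := (mm0 c a1 a2).1 hc'
            exact ⟨a1, a2, this.2⟩)
      (by rw [e0]; exact nd0)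
    have hq2 : st.2.drop (head + 1) = comp.drop (head + 1) ++ Δ₀ := by
      rw [e0]
      exact List.drop_append_of_le_length (by omega)
    refine ⟨c1, fun x hx => c2 x (hmono0 x hx), ?_, ?_, Δ₀ ++ Δ1, ?_, ?_, ?_, ?_⟩
    · -- soundness
      intro x hx hvx
      rcases c3 x hx hvx with h2 | ⟨s, hs, v, hadj, hp⟩
      · rcases (f2 x).1 h2 with h3 | ⟨w, hwl, hwx⟩
        · exact Or.inl h3
        · by_cases hvisx : pvVisN vis x
          · exact Or.inl hvisx
          · refine Or.inr ⟨comp[head]'h, by rw [hdrop]; exact List.mem_cons_self .., x, ?_, ?_⟩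
            · unfold pvAdjN
              have : ((x : Nat) : Int) = w := by
                obtain ⟨hw0, _⟩ := hrange (comp[head]'h).toNat w hwl
                omega
              rw [this]
              exact hwl
            · exact pvPath.refl x hvisx
      · have hp' : pvPath adj (pvVisN vis) v x := pvPath_anti hmono0 hp
        rw [hq2] at hs
        rcases List.mem_append.1 hs with hs' | hs'
        · exact Or.inr ⟨s, by rw [hdrop]; exact List.mem_cons_of_mem _ hs', v, hadj, hp'⟩
        · obtain ⟨⟨hs0, hsn⟩, hsl⟩ := rg0 s hs'
          have hsnv : ¬ pvVisN vis s.toNat := ((mm0 s hs0 hsn).1 hs').1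
          refine Or.inr ⟨comp[head]'h, by rw [hdrop]; exact List.mem_cons_self .., s.toNat, ?_, ?_⟩
          · unfold pvAdjN
            rw [Int.toNat_of_nonneg hs0]
            exact hsl
          · exact pvPath.head _ _ _ hsnv hadj hp'
    · -- completeness
      intro s hs v x hadj hp
      have hM : ∀ y : Nat, pvVisN st.1 y ↔ pvVisN vis y ∨
          (¬ pvVisN vis y ∧ ∃ w ∈ adj.getD (comp[head]'h).toNat [], w.toNat = y) := by
        intro y
        rw [f2 y]
        by_cases hy : pvVisN vis y <;> tauto
      have hcongr : ∀ {a b : Nat}, pvPath adj (fun y => pvVisN vis y ∨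
          (¬ pvVisN vis y ∧ ∃ w ∈ adj.getD (comp[head]'h).toNat [], w.toNat = y)) a b →
          pvPath adj (pvVisN st.1) a b :=
        fun hq => pvPath_congr (fun y => (hM y).symm) hq
      rcases pvPath_mark (M := fun y => ¬ pvVisN vis y ∧
          ∃ w ∈ adj.getD (comp[head]'h).toNat [], w.toNat = y) hp
        with p2 | hx | ⟨m, v', hm, hadj', p2⟩
      · have p2' := hcongr p2
        rw [hdrop] at hs
        rcases List.mem_cons.1 hs with hsu | hs'
        · -- s is the popped vertex: its neighbour v is marked after the fold
          have hvl2 : (v : Int) ∈ adj.getD (comp[head]'h).toNat [] := by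
            have := hadj
            unfold pvAdjN at this
            rw [hsu] at this
            exact this
          have hvm : pvVisN st.1 v := by
            by_cases hvv : pvVisN vis v
            · exact hmono0 v hvv
            · exact (hM v).2 (Or.inr ⟨hvv, (v : Int), hvl2, by simp⟩)
          exact absurd hvm (pvPath_not_start p2')
        · exact c4 s (by rw [hq2]; exact List.mem_append_left _ hs') v x hadj p2'
      · -- the endpoint is newly marked by the fold
        exact c2 x ((hM x).2 (Or.inr hx))
      · -- re-rooted at a newly marked vertex m
        obtain ⟨hnm, w, hwl, hwm⟩ := hm
        obtain ⟨hw0, hwn⟩ := hrange (comp[head]'h).toNat w hwl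
        have hwΔ : w ∈ Δ₀ := (mm0 w hw0 hwn).2
          ⟨by rw [hwm]; exact hnm, by rw [hwm]; exact (hM m).2 (Or.inr ⟨hnm, w, hwl, hwm⟩)⟩
        have hadj'' : pvAdjN adj w.toNat v' := by
          unfold pvAdjN at hadj' ⊢
          rw [hwm]
          exact hadj'
        exact c4 w (by rw [hq2]; exact List.mem_append_right _ hwΔ) v' x hadj'' (hcongr p2)
    · rw [e1, e0, List.append_assoc]
    · rw [e0] at nd1
      rw [List.append_assoc] at nd1
      exact nd1
    · intro c hc
      rcases List.mem_append.1 hc with hc' | hc'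
      · exact (rg0 c hc').1
      · exact rg1 c hc'
    · intro w hw0 hwn
      have h0 := mm0 w hw0 hwn
      have h1 := mm1 w hw0 hwn
      rw [List.mem_append]
      constructor
      · rintro (hw | hw)
        · obtain ⟨m1, m2⟩ := h0.1 hw
          exact ⟨m1, c2 w.toNat m2⟩
        · obtain ⟨m1, m2⟩ := h1.1 hw
          exact ⟨fun hx => m1 (hmono0 _ hx), m2⟩
      · rintro ⟨m1, m2⟩
        by_cases hm : pvVisN st.1 w.toNat
        · exact Or.inl (h0.2 ⟨m1, hm⟩)
        · exact Or.inr (h1.2 ⟨hm, m2⟩)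

-- step functions (zeta-expanded bodies of the two ports' outer folds)
def pvStepA (adj : List (List Int)) (st : List Bool × Int) (i : Nat) : List Bool × Int :=
  if st.1.getD i true then st
  else if (pvDfsA adj st.1 [(i : Int)] []).2.all (fun u =>
      (((adj.getD u.toNat []).filter (fun v =>
          PySem.Set.contains (PySem.Set.ofList (pvDfsA adj st.1 [(i : Int)] []).2) v)).length : Int)
        == ((pvDfsA adj st.1 [(i : Int)] []).2.length : Int) - 1)
  then ((pvDfsA adj st.1 [(i : Int)] []).1, st.2 + 1)
  else ((pvDfsA adj st.1 [(i : Int)] []).1, st.2)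

def pvStepB (adj : List (List Int)) (deg : List Int) (st : List Bool × Int) (i : Nat) :
    List Bool × Int :=
  if st.1.getD i true then st
  else if (pvBfsB adj (st.1.set i true) [(i : Int)] 0).2.all (fun u =>
      deg.getD u.toNat 0 == ((pvBfsB adj (st.1.set i true) [(i : Int)] 0).2.length : Int) - 1)
  then ((pvBfsB adj (st.1.set i true) [(i : Int)] 0).1, st.2 + 1)
  else ((pvBfsB adj (st.1.set i true) [(i : Int)] 0).1, st.2)

set_option maxHeartbeats 1000000 in
theorem pvStep_eq (n : Int) (adj : List (List Int)) (deg : List Int)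
    (hlen : adj.length = n.toNat)
    (hrange : ∀ j : Nat, ∀ v ∈ adj.getD j [], 0 ≤ v ∧ v < n)
    (hsym : ∀ u v : Int, 0 ≤ u → u < n → 0 ≤ v → v < n →
        v ∈ adj.getD u.toNat [] → u ∈ adj.getD v.toNat [])
    (hdeg : deg = adj.map (fun a => (a.length : Int)))
    (i : Nat) (hi : i < n.toNat) (vis : List Bool) (cnt : Int)
    (hvl : vis.length = n.toNat)
    (hclo : ∀ j : Nat, j < n.toNat → pvVisN vis j →
        ∀ v ∈ adj.getD j [], pvVisN vis v.toNat) :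
    pvStepA adj (vis, cnt) i = pvStepB adj deg (vis, cnt) i
    ∧ (pvStepA adj (vis, cnt) i).1.length = n.toNat
    ∧ (∀ j : Nat, j < n.toNat → pvVisN (pvStepA adj (vis, cnt) i).1 j →
        ∀ v ∈ adj.getD j [], pvVisN (pvStepA adj (vis, cnt) i).1 v.toNat) := by
  by_cases hvi : vis.getD i true = true
  · have hA : pvStepA adj (vis, cnt) i = (vis, cnt) := by
      rw [pvStepA]; rw [if_pos hvi]
    have hB : pvStepB adj deg (vis, cnt) i = (vis, cnt) := by
      rw [pvStepB]; rw [if_pos hvi]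
    refine ⟨by rw [hA, hB], by rw [hA]; exact hvl, by rw [hA]; exact hclo⟩
  · have hvf : vis.getD i true = false := by
      cases hb : vis.getD i true
      · rfl
      · exact absurd hb hvi
    have hni : ¬ pvVisN vis i := by unfold pvVisN; rw [hvf]; simp
    have hilt : i < vis.length := by omega
    have hset : ∀ x, pvVisN (vis.set i true) x ↔ pvVisN vis x ∨ x = i := pvVisN_set hilt
    have hi' : ((i : Int)).toNat = i := by omega
    have hin : (i : Int) < n := by omega
    -- DFS characterisation
    obtain ⟨a1, a2, a3, a4, ΔA, eA, ndA, rgA, mmA⟩ :=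
      pvDfsA_spec' n adj hrange vis [(i : Int)] [] hvl
        (by intro s hs
            have : s = (i : Int) := List.mem_singleton.1 hs
            rw [this]
            exact ⟨by positivity, hin⟩)
        (by intro c hc; simp at hc)
        (by simp)
    -- BFS characterisation
    obtain ⟨b1, b2, b3, b4, ΔB, eB, ndB, rgB, mmB⟩ :=
      pvBfsB_spec' n adj hrange (vis.set i true) [(i : Int)] 0
        (by simpa using hvl)
        (by intro c hc
            have hc' : c = (i : Int) := List.mem_singleton.1 hc
            rw [hc']
            exact ⟨by positivity, hin, by rw [hi']; exact (hset i).2 (Or.inr rfl)⟩)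
        (by simp)
    have hsingle : ∀ s : Int, s ∈ ([(i : Int)] : List Int).drop 0 ↔ s = (i : Int) := by
      intro s; simp
    -- marked vertex i in the DFS result
    have hAi : pvVisN (pvDfsA adj vis [(i : Int)] []).1 i := by
      have := a4 (i : Int) (List.mem_singleton_self _) i
      rw [hi'] at this
      exact this (pvPath.refl i hni)
    -- marks agree
    have hmarks : ∀ x : Nat, x < n.toNat →
        (pvVisN (pvDfsA adj vis [(i : Int)] []).1 x ↔
         pvVisN (pvBfsB adj (vis.set i true) [(i : Int)] 0).1 x) := by
      intro x hx
      constructor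
      · intro hvx
        rcases a3 x hx hvx with h2 | ⟨s, hs, hp⟩
        · exact b2 x ((hset x).2 (Or.inl h2))
        · have hsi : s = (i : Int) := List.mem_singleton.1 hs
          rw [hsi, hi'] at hp
          cases hp with
          | refl _ h => exact b2 _ ((hset _).2 (Or.inr rfl))
          | head _ v _ h1 h2 hp2 =>
            have hcongr : ∀ {a b : Nat}, pvPath adj (fun y => pvVisN vis y ∨ y = i) a b →
                pvPath adj (pvVisN (vis.set i true)) a b :=
              fun hq => pvPath_congr (fun y => (hset y).symm) hq
            rcases pvPath_mark (M := fun y => y = i) hp2 with p2 | hxi | ⟨m, v', hm, hadj', p2⟩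
            · exact b4 (i : Int) ((hsingle _).2 rfl) v x (by rw [hi']; exact h2) (hcongr p2)
            · have : pvVisN (vis.set i true) x := by rw [hxi]; exact (hset i).2 (Or.inr rfl)
              exact b2 x this
            · have hadj2 : pvAdjN adj ((i : Int)).toNat v' := by
                rw [hi']; rw [hm] at hadj'; exact hadj'
              exact b4 (i : Int) ((hsingle _).2 rfl) v' x hadj2 (hcongr p2)
      · intro hvx
        rcases b3 x hx hvx with h2 | ⟨s, hs, v, hadj, hp⟩
        · rcases (hset x).1 h2 with h3 | h3
          · exact a2 x h3
          · rw [h3]; exact hAi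
        · have hsi : s = (i : Int) := (hsingle s).1 hs
          have hp' : pvPath adj (pvVisN vis) v x :=
            pvPath_anti (fun y hy => (hset y).2 (Or.inl hy)) hp
          have hadj2 : pvAdjN adj i v := by rw [hsi, hi'] at hadj; exact hadj
          have hpath : pvPath adj (pvVisN vis) i x := pvPath.head i v x hni hadj2 hp'
          have := a4 (i : Int) (List.mem_singleton_self _) x
          rw [hi'] at this
          exact this hpath
    -- the visited lists are equal
    have hveq : (pvDfsA adj vis [(i : Int)] []).1 = (pvBfsB adj (vis.set i true) [(i : Int)] 0).1 := by
      apply List.ext_getElem (by rw [a1, b1])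
      intro j h1 h2
      have hj : j < n.toNat := by rw [a1] at h1; exact h1
      have hiff := hmarks j hj
      unfold pvVisN at hiff
      rw [List.getD_eq_getElem?_getD, List.getD_eq_getElem?_getD,
        List.getElem?_eq_getElem h1, List.getElem?_eq_getElem h2] at hiff
      simp only [Option.getD_some] at hiff
      revert hiff
      cases (pvDfsA adj vis [(i : Int)] []).1[j] <;>
        cases (pvBfsB adj (vis.set i true) [(i : Int)] 0).1[j] <;> simp
    -- membership in the two component lists agrees
    have hmemAB : ∀ w : Int, w ∈ (pvDfsA adj vis [(i : Int)] []).2 ↔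
        w ∈ (pvBfsB adj (vis.set i true) [(i : Int)] 0).2 := by
      intro w
      rw [eA, eB]
      simp only [List.nil_append, List.cons_append, List.nil_append]
      constructor
      · intro hw
        obtain ⟨⟨hw0, hwn⟩⟩ := And.intro (rgA w hw) trivial
        obtain ⟨m1, m2⟩ := (mmA w hw0 hwn).1 hw
        by_cases hwi : w = (i : Int)
        · rw [hwi]; exact List.mem_cons_self ..
        · have hne : w.toNat ≠ i := by omega
          refine List.mem_cons_of_mem _ ((mmB w hw0 hwn).2 ⟨?_, ?_⟩)
          · intro hx
            rcases (hset w.toNat).1 hx with h3 | h3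
            · exact m1 h3
            · exact hne h3
          · have hwlt : w.toNat < n.toNat := by omega
            exact (hmarks w.toNat hwlt).1 m2
      · intro hw
        rcases List.mem_cons.1 hw with hwi | hw'
        · rw [hwi]
          refine (mmA (i : Int) (by positivity) hin).2 ?_
          rw [hi']
          exact ⟨hni, hAi⟩
        · obtain ⟨⟨hw0, hwn⟩⟩ := And.intro (rgB w hw') trivial
          obtain ⟨m1, m2⟩ := (mmB w hw0 hwn).1 hw'
          have hwlt : w.toNat < n.toNat := by omega
          refine (mmA w hw0 hwn).2 ⟨?_, (hmarks w.toNat hwlt).2 m2⟩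
          intro hx
          exact m1 ((hset w.toNat).2 (Or.inl hx))
    -- both component lists have no duplicates, hence equal length
    have hndA : (pvDfsA adj vis [(i : Int)] []).2.Nodup := by rw [eA]; simpa using ndA
    have hndB : (pvBfsB adj (vis.set i true) [(i : Int)] 0).2.Nodup := by rw [eB]; exact ndB
    have hperm : (pvDfsA adj vis [(i : Int)] []).2.Perm
        (pvBfsB adj (vis.set i true) [(i : Int)] 0).2 :=
      (List.perm_ext_iff_of_nodup hndA hndB).2 hmemAB
    have hk : ((pvDfsA adj vis [(i : Int)] []).2.length : Int)
        = ((pvBfsB adj (vis.set i true) [(i : Int)] 0).2.length : Int) := by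
      rw [hperm.length_eq]
    -- each member's neighbours lie in the component
    have hnbr : ∀ u ∈ (pvDfsA adj vis [(i : Int)] []).2,
        ∀ v ∈ adj.getD u.toNat [], v ∈ (pvDfsA adj vis [(i : Int)] []).2 := by
      intro u hu v hv
      have huA : u ∈ ΔA := by rw [eA] at hu; simpa using hu
      obtain ⟨hu0, hun⟩ := rgA u huA
      obtain ⟨m1, m2⟩ := (mmA u hu0 hun).1 huA
      obtain ⟨hv0, hvn⟩ := hrange u.toNat v hv
      have hult : u.toNat < n.toNat := by omega
      have hvlt : v.toNat < n.toNat := by omega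
      -- v is not previously visited (else by closure+symmetry u would be)
      have hnv : ¬ pvVisN vis v.toNat := by
        intro hvv
        have hvu : u ∈ adj.getD v.toNat [] := hsym u v hu0 hun hv0 hvn hv
        exact m1 (hclo v.toNat hvlt hvv u hvu)
      -- a path from i to u
      rcases a3 u.toNat hult m2 with h2 | ⟨s, hs, hp⟩
      · exact absurd h2 m1
      · have hsi : s = (i : Int) := List.mem_singleton.1 hs
        rw [hsi, hi'] at hp
        have hadjuv : pvAdjN adj u.toNat v.toNat := by
          unfold pvAdjN
          rw [Int.toNat_of_nonneg hv0]
          exact hv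
        have hp2 : pvPath adj (pvVisN vis) i v.toNat := pvPath_snoc hp hadjuv hnv
        have hmk : pvVisN (pvDfsA adj vis [(i : Int)] []).1 v.toNat := by
          have := a4 (i : Int) (List.mem_singleton_self _) v.toNat
          rw [hi'] at this
          exact this hp2
        rw [eA]
        simpa using (mmA v hv0 hvn).2 ⟨hnv, hmk⟩
    -- the two completeness tests agree
    have hdegD : ∀ u : Int, 0 ≤ u → u < n → deg.getD u.toNat 0 = ((adj.getD u.toNat []).length : Int) := by
      intro u hu0 hun
      have hult : u.toNat < adj.length := by omega
      rw [hdeg, List.getD_eq_getElem?_getD, List.getD_eq_getElem?_getD, List.getElem?_map,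
        List.getElem?_eq_getElem hult]
      simp
    have hall : ((pvDfsA adj vis [(i : Int)] []).2.all (fun u =>
        (((adj.getD u.toNat []).filter (fun v =>
            PySem.Set.contains (PySem.Set.ofList (pvDfsA adj vis [(i : Int)] []).2) v)).length : Int)
          == ((pvDfsA adj vis [(i : Int)] []).2.length : Int) - 1))
        = ((pvBfsB adj (vis.set i true) [(i : Int)] 0).2.all (fun u =>
        deg.getD u.toNat 0 == ((pvBfsB adj (vis.set i true) [(i : Int)] 0).2.length : Int) - 1)) := by
      have hpAB : ∀ u ∈ (pvDfsA adj vis [(i : Int)] []).2,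
          ((((adj.getD u.toNat []).filter (fun v =>
              PySem.Set.contains (PySem.Set.ofList (pvDfsA adj vis [(i : Int)] []).2) v)).length : Int)
            == ((pvDfsA adj vis [(i : Int)] []).2.length : Int) - 1)
          = (deg.getD u.toNat 0 == ((pvBfsB adj (vis.set i true) [(i : Int)] 0).2.length : Int) - 1) := by
        intro u hu
        have huA : u ∈ ΔA := by rw [eA] at hu; simpa using hu
        obtain ⟨hu0, hun⟩ := rgA u huA
        have hfil : (adj.getD u.toNat []).filter (fun v =>
            PySem.Set.contains (PySem.Set.ofList (pvDfsA adj vis [(i : Int)] []).2) v)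
            = adj.getD u.toNat [] := by
          apply List.filter_eq_self.2
          intro v hv
          have hvmem := hnbr u hu v hv
          simpa [PySem.Set.contains] using hvmem
        rw [hfil, hdegD u hu0 hun, hk]
      rcases Bool.eq_false_or_eq_true ((pvDfsA adj vis [(i : Int)] []).2.all _) with hA | hA
      · rw [hA]
        symm
        rw [List.all_eq_true]
        intro u hu
        have hu' : u ∈ (pvDfsA adj vis [(i : Int)] []).2 := (hmemAB u).2 hu
        rw [← hpAB u hu']
        rw [List.all_eq_true] at hA
        exact hA u hu'
      · rw [hA]
        have : ∃ u ∈ (pvDfsA adj vis [(i : Int)] []).2, ¬ ((((adj.getD u.toNat []).filter (fun v =>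
            PySem.Set.contains (PySem.Set.ofList (pvDfsA adj vis [(i : Int)] []).2) v)).length : Int)
            == ((pvDfsA adj vis [(i : Int)] []).2.length : Int) - 1) = true := by
          rw [List.all_eq_false] at hA
          obtain ⟨u, hu, hne⟩ := hA
          exact ⟨u, hu, by simpa using hne⟩
        obtain ⟨u, hu, hne⟩ := this
        symm
        rw [List.all_eq_false]
        refine ⟨u, (hmemAB u).1 hu, ?_⟩
        rw [← hpAB u hu]
        simpa using hne
    -- assemble the step
    have hA : pvStepA adj (vis, cnt) i = (if ((pvDfsA adj vis [(i : Int)] []).2.all (fun u =>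
        (((adj.getD u.toNat []).filter (fun v =>
            PySem.Set.contains (PySem.Set.ofList (pvDfsA adj vis [(i : Int)] []).2) v)).length : Int)
          == ((pvDfsA adj vis [(i : Int)] []).2.length : Int) - 1))
        then ((pvDfsA adj vis [(i : Int)] []).1, cnt + 1)
        else ((pvDfsA adj vis [(i : Int)] []).1, cnt)) := by
      rw [pvStepA]; rw [if_neg (by rw [hvf]; simp)]
    have hB : pvStepB adj deg (vis, cnt) i = (if ((pvBfsB adj (vis.set i true) [(i : Int)] 0).2.all (fun u =>
        deg.getD u.toNat 0 == ((pvBfsB adj (vis.set i true) [(i : Int)] 0).2.length : Int) - 1))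
        then ((pvBfsB adj (vis.set i true) [(i : Int)] 0).1, cnt + 1)
        else ((pvBfsB adj (vis.set i true) [(i : Int)] 0).1, cnt)) := by
      rw [pvStepB]; rw [if_neg (by rw [hvf]; simp)]
    have hfst : (pvStepA adj (vis, cnt) i).1 = (pvDfsA adj vis [(i : Int)] []).1 := by
      rw [hA]
      split <;> rfl
    refine ⟨?_, ?_, ?_⟩
    · rw [hA, hB, hall, hveq]
    · rw [hfst]; exact a1
    · rw [hfst]
      intro j hj hvj v hv
      obtain ⟨hv0, hvn⟩ := hrange j v hv
      have hvlt : v.toNat < n.toNat := by omega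
      rcases a3 j hj hvj with h2 | ⟨s, hs, hp⟩
      · exact a2 v.toNat (hclo j hj h2 v hv)
      · have hsi : s = (i : Int) := List.mem_singleton.1 hs
        rw [hsi, hi'] at hp
        by_cases hvv : pvVisN vis v.toNat
        · exact a2 v.toNat hvv
        · have hadjuv : pvAdjN adj j v.toNat := by
            unfold pvAdjN
            rw [Int.toNat_of_nonneg hv0]
            exact hv
          have hp2 : pvPath adj (pvVisN vis) i v.toNat := pvPath_snoc hp hadjuv hvv
          have := a4 (i : Int) (List.mem_singleton_self _) v.toNat
          rw [hi'] at this
          exact this hp2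

theorem pvLoop (n : Int) (adj : List (List Int)) (deg : List Int)
    (hlen : adj.length = n.toNat)
    (hrange : ∀ j : Nat, ∀ v ∈ adj.getD j [], 0 ≤ v ∧ v < n)
    (hsym : ∀ u v : Int, 0 ≤ u → u < n → 0 ≤ v → v < n →
        v ∈ adj.getD u.toNat [] → u ∈ adj.getD v.toNat [])
    (hdeg : deg = adj.map (fun a => (a.length : Int))) :
    ∀ (is : List Nat), (∀ i ∈ is, i < n.toNat) →
    ∀ (vis : List Bool) (cnt : Int), vis.length = n.toNat →
    (∀ j : Nat, j < n.toNat → pvVisN vis j → ∀ v ∈ adj.getD j [], pvVisN vis v.toNat) →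
    is.foldl (pvStepA adj) (vis, cnt) = is.foldl (pvStepB adj deg) (vis, cnt) := by
  intro is
  induction is with
  | nil => intro _ vis cnt _ _; rfl
  | cons i is ih =>
    intro hmem vis cnt hvl hclo
    obtain ⟨heq, hl2, hc2⟩ := pvStep_eq n adj deg hlen hrange hsym hdeg i
      (hmem i (List.mem_cons_self ..)) vis cnt hvl hclo
    simp only [List.foldl_cons]
    rw [← heq]
    have := ih (fun j hj => hmem j (List.mem_cons_of_mem _ hj))
      (pvStepA adj (vis, cnt) i).1 (pvStepA adj (vis, cnt) i).2 hl2 hc2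
    simpa using this

theorem pvOuter' (n : Int) (edges : List (List Int))
    (hpre : Pre_countCompleteComponents n edges) :
    countCompleteComponents n edges = countCompleteComponents_alt n edges := by
  obtain ⟨hlen, hrg, hsym'⟩ := pvBuildAdj_spec' n edges hpre
  have hsym : ∀ u v : Int, 0 ≤ u → u < n → 0 ≤ v → v < n →
      v ∈ (pvBuildAdj n edges).getD u.toNat [] → u ∈ (pvBuildAdj n edges).getD v.toNat [] :=
    hsym'
  show ((List.range n.toNat).foldl (pvStepA (pvBuildAdj n edges))
      (List.replicate n.toNat false, 0)).2
    = ((List.range n.toNat).foldl (pvStepB (pvBuildAdj n edges)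
        ((pvBuildAdj n edges).map (fun a => (a.length : Int)))) (List.replicate n.toNat false, 0)).2
  rw [pvLoop n (pvBuildAdj n edges) ((pvBuildAdj n edges).map (fun a => (a.length : Int)))
    hlen hrg hsym rfl (List.range n.toNat) (by intro j hj; simpa using hj)
    (List.replicate n.toNat false) 0 (by simp)
    (by intro j hj hvj v hv
        exfalso
        apply absurd hvj
        unfold pvVisN
        rw [List.getD_eq_getElem?_getD, List.getElem?_replicate, if_pos hj]
        simp)]

-- ===== VERDICT (by name: the statement is the Claim_ definition above) =====
theorem countCompleteComponents_spec : Claim_equal_countCompleteComponents := by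
  intro n edges _ hpre
  unfold Spec_countCompleteComponents
  exact pvOuter' n edges hpre
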